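-- pv_equiv track=rewrite | github.com/somamos/syllabification-by-analogy | oldpatternmatcher.py | populate_legacy
-- ===== SOURCE A (Python) =====
-- def populate_legacy(input_word, entry_word, phonemes):
-- 	matches = []
-- 	length_difference = len(input_word) - len(entry_word)
-- 	# a is always the longer word.
-- 	a, b = (input_word, entry_word) if length_difference >= 0 else (entry_word, input_word)
-- 	for offset in range(abs(length_difference) + 1):
-- 		index = -1
-- 		length = 0
-- 		match = ''
-- 		char_buffer = [False, False]
-- 		for k in range(0, len(b) + 1):
-- 			# Iterate buffer.
-- 			char_buffer[0] = char_buffer[1] # Begin False (default).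
-- 			char_buffer[1] = (b[k] == a[offset + k]) if k != len(b) else False # End False.
-- 			# Currently in the middle of a match.
-- 			if all(char_buffer):
-- 				length += 1
-- 				match += b[k] # Append to match.
-- 			# Match just started.
-- 			elif char_buffer == [False, True]:
-- 				index = k
-- 				length = 1
-- 				match = b[k] # Flush match.
-- 			# Match just ended.
-- 			elif char_buffer == [True, False]:
-- 				# Insufficient length.
-- 				if length == 1:
-- 					continue
-- 				if length_difference < 0:
-- 					# When the entry word is bigger, phoneme indices "shift right" to remain accurate.
-- 					matches.append((match, phonemes[index + offset : index + offset + length], index, entry_word))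
-- 				else:
-- 					# When the entry word is smaller, matched indices "shift right" to remain accurate.
-- 					matches.append((match, phonemes[index : index + length], index + offset, entry_word))
-- 	return matches
-- ===== SOURCE B (Python) =====
-- def populate_legacy(input_word, entry_word, phonemes):
-- 	# Two-pointer run extraction: jump over each maximal matching run instead of a per-character buffer state machine.
-- 	length_difference = len(input_word) - len(entry_word)
-- 	a, b = (input_word, entry_word) if length_difference >= 0 else (entry_word, input_word)
-- 	matches = []
-- 	n = len(b)
-- 	for offset in range(abs(length_difference) + 1):
-- 		k = 0
-- 		while k < n:
-- 			if b[k] == a[offset + k]: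
-- 				start = k
-- 				while k < n and b[k] == a[offset + k]:
-- 					k += 1
-- 				length = k - start
-- 				if length >= 2:
-- 					if length_difference < 0:
-- 						matches.append((b[start:k], phonemes[start + offset : start + offset + length], start, entry_word))
-- 					else:
-- 						matches.append((b[start:k], phonemes[start : start + length], start + offset, entry_word))
-- 			else:
-- 				k += 1
-- 	return matches
-- ===== Notes on version B (the rewrite author's own statement) =====
-- stated objective: simpler
-- what changed: Replaced the per-character two-slot char_buffer state machine (index/length/match accumulators plus a sentinel pass at k=len(b)) by a two-pointer scan that jumps over each maximal matching run and emits it directly from its start index and length.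
import Mathlib
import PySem

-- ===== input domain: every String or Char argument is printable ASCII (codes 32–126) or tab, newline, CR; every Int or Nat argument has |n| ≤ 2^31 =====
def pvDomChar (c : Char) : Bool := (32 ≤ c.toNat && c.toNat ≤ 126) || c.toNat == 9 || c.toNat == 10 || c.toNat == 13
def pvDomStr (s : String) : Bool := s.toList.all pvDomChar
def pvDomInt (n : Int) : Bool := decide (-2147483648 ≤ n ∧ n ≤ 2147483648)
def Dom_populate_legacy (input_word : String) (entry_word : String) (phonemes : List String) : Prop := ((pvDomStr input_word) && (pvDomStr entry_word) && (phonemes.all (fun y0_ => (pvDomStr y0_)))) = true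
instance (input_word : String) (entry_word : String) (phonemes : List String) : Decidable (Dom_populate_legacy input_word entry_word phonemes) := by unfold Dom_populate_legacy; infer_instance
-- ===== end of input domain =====

-- B replaces A's two-slot char_buffer state machine by a two-pointer scan that jumps over each
-- maximal matching run and emits it from its start index and length (objective: simpler).


-- ===== PORT A =====
-- loop state: (matches, index, length, match chars, char_buffer[0], char_buffer[1])
abbrev pvStateA : Type := List (String × List String × Int × String) × Int × Int × List Char × Bool × Bool

-- the body of A's inner `for k` loop, transliterated step for step
def pvStepA (a b : List Char) (phonemes : List String) (ld : Int) (entry_word : String)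
    (offset : Nat) (st : pvStateA) (k : Nat) : pvStateA :=
  match st with
  | (ms, index, length, mtch, _cb0, cb1) =>
    -- Iterate buffer.
    let c0 := cb1
    let c1 := if k ≠ b.length then (b.getD k ' ' == a.getD (offset + k) ' ') else false
    -- Currently in the middle of a match.
    if c0 && c1 then (ms, index, length + 1, mtch ++ [b.getD k ' '], c0, c1)
    -- Match just started.
    else if !c0 && c1 then (ms, (k : Int), 1, [b.getD k ' '], c0, c1)
    -- Match just ended.
    else if c0 && !c1 then
      -- Insufficient length.
      if length == 1 then (ms, index, length, mtch, c0, c1)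
      else if ld < 0 then
        (ms ++ [(String.mk mtch, PySem.List.slice phonemes (index + (offset : Int)) (index + (offset : Int) + length), index, entry_word)], index, length, mtch, c0, c1)
      else
        (ms ++ [(String.mk mtch, PySem.List.slice phonemes index (index + length), index + (offset : Int), entry_word)], index, length, mtch, c0, c1)
    else (ms, index, length, mtch, c0, c1)

def populate_legacy (input_word : String) (entry_word : String) (phonemes : List String) : List (String × List String × Int × String) :=
  let ld : Int := (input_word.toList.length : Int) - (entry_word.toList.length : Int)
  -- a is always the longer word.
  let ab := if ld ≥ 0 then (input_word.toList, entry_word.toList) else (entry_word.toList, input_word.toList)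
  let a := ab.1
  let b := ab.2
  (List.range (ld.natAbs + 1)).foldl
    (fun ms offset =>
      ((List.range (b.length + 1)).foldl (pvStepA a b phonemes ld entry_word offset)
        (ms, -1, 0, ([] : List Char), false, false)).1)
    []

-- ===== PORT B =====
-- length of the maximal run of matching positions starting at k (B's inner while)
def pvRunLen (a b : List Char) (offset : Nat) (k : Nat) : Nat :=
  if k < b.length then
    if b.getD k ' ' == a.getD (offset + k) ' ' then pvRunLen a b offset (k + 1) + 1 else 0
  else 0
termination_by b.length - k

-- B's outer while loop: jump over each maximal run, emitting it if its length is ≥ 2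
def pvScan (a b : List Char) (phonemes : List String) (ld : Int) (entry_word : String)
    (offset : Nat) (k : Nat) : List (String × List String × Int × String) :=
  if k < b.length then
    if b.getD k ' ' == a.getD (offset + k) ' ' then
      let len := pvRunLen a b offset (k + 1) + 1
      let rest := pvScan a b phonemes ld entry_word offset (k + len)
      if 2 ≤ len then
        (if ld < 0 then
          (String.mk ((b.drop k).take len), PySem.List.slice phonemes ((k : Int) + (offset : Int)) ((k : Int) + (offset : Int) + (len : Int)), (k : Int), entry_word)
         else
          (String.mk ((b.drop k).take len), PySem.List.slice phonemes (k : Int) ((k : Int) + (len : Int)), (k : Int) + (offset : Int), entry_word)) :: rest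
      else rest
    else pvScan a b phonemes ld entry_word offset (k + 1)
  else []
termination_by b.length - k
decreasing_by all_goals omega

def populate_legacy_alt (input_word : String) (entry_word : String) (phonemes : List String) : List (String × List String × Int × String) :=
  let ld : Int := (input_word.toList.length : Int) - (entry_word.toList.length : Int)
  let ab := if ld ≥ 0 then (input_word.toList, entry_word.toList) else (entry_word.toList, input_word.toList)
  let a := ab.1
  let b := ab.2
  (List.range (ld.natAbs + 1)).foldl
    (fun ms offset => ms ++ pvScan a b phonemes ld entry_word offset 0)
    []

-- ===== PRECONDITION & SPEC =====
def Spec_populate_legacy (input_word : String) (entry_word : String) (phonemes : List String) (out : List (String × List String × Int × String)) : Prop := out = populate_legacy_alt input_word entry_word phonemes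
instance (input_word : String) (entry_word : String) (phonemes : List String) (out : List (String × List String × Int × String)) : Decidable (Spec_populate_legacy input_word entry_word phonemes out) := by unfold Spec_populate_legacy; infer_instance

-- ===== CLAIM (what is proved, stated in full; the proofs are below) =====
def Claim_equal_populate_legacy : Prop := ∀ (input_word : String) (entry_word : String) (phonemes : List String), Dom_populate_legacy input_word entry_word phonemes → Spec_populate_legacy input_word entry_word phonemes (populate_legacy input_word entry_word phonemes)

-- ===== LEMMAS AND PROOFS =====

-- the tuple B emits for a run of length `len` starting at index `i`
def pvEmit (b : List Char) (phonemes : List String) (ld : Int) (entry_word : String)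
    (offset : Nat) (i : Nat) (len : Nat) : String × List String × Int × String :=
  if ld < 0 then
    (String.mk ((b.drop i).take len), PySem.List.slice phonemes ((i : Int) + (offset : Int)) ((i : Int) + (offset : Int) + (len : Int)), (i : Int), entry_word)
  else
    (String.mk ((b.drop i).take len), PySem.List.slice phonemes (i : Int) ((i : Int) + (len : Int)), (i : Int) + (offset : Int), entry_word)

lemma pvRunLen_stop (a b : List Char) (offset k : Nat) :
    ¬(k + pvRunLen a b offset k < b.length ∧
      (b.getD (k + pvRunLen a b offset k) ' ' == a.getD (offset + (k + pvRunLen a b offset k)) ' ') = true) := by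
  by_cases h : k < b.length
  · by_cases hm : (b.getD k ' ' == a.getD (offset + k) ' ') = true
    · rw [pvRunLen, if_pos h, if_pos hm]
      have ih := pvRunLen_stop a b offset (k + 1)
      intro ⟨h1, h2⟩
      apply ih
      constructor
      · omega
      · rw [show k + 1 + pvRunLen a b offset (k + 1) = k + (pvRunLen a b offset (k + 1) + 1) from by omega]
        exact h2
    · rw [pvRunLen, if_pos h, if_neg hm]
      intro ⟨h1, h2⟩
      rw [Nat.add_zero] at h2
      exact hm h2
  · rw [pvRunLen, if_neg h]
    intro ⟨h1, _⟩; omega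
termination_by b.length - k
decreasing_by omega

lemma pvScan_skip (a b : List Char) (phonemes : List String) (ld : Int) (entry_word : String)
    (offset k : Nat) :
    pvScan a b phonemes ld entry_word offset (k + pvRunLen a b offset k)
      = pvScan a b phonemes ld entry_word offset (k + pvRunLen a b offset k + 1) := by
  have hs := pvRunLen_stop a b offset k
  by_cases h : k + pvRunLen a b offset k < b.length
  · have hm : ¬(b.getD (k + pvRunLen a b offset k) ' ' == a.getD (offset + (k + pvRunLen a b offset k)) ' ') = true :=
      fun hmm => hs ⟨h, hmm⟩
    rw [pvScan, if_pos h, if_neg hm]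
  · rw [pvScan, if_neg h, pvScan, if_neg (by omega)]

-- A's inner loop over the remaining positions equals B's run scan, in either loop mode.
lemma pvMain (a b : List Char) (phonemes : List String) (ld : Int) (entry_word : String)
    (offset : Nat) (cnt : Nat) :
    (∀ k, k + cnt = b.length + 1 → ∀ ms i l m c0,
      ((List.range' k cnt).foldl (pvStepA a b phonemes ld entry_word offset) (ms, i, l, m, c0, false)).1
        = ms ++ pvScan a b phonemes ld entry_word offset k) ∧
    (∀ k, k + cnt = b.length + 1 → k ≤ b.length → ∀ ms (i0 l : Nat) c0, 1 ≤ l → i0 + l = k →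
      ((List.range' k cnt).foldl (pvStepA a b phonemes ld entry_word offset)
          (ms, (i0 : Int), (l : Int), (b.drop i0).take l, c0, true)).1
        = ms ++ (if 2 ≤ l + pvRunLen a b offset k then [pvEmit b phonemes ld entry_word offset i0 (l + pvRunLen a b offset k)] else [])
            ++ pvScan a b phonemes ld entry_word offset (k + pvRunLen a b offset k + 1)) := by
  induction cnt with
  | zero =>
    refine ⟨fun k hk ms i l m c0 => ?_, fun k hk hkle ms i0 l c0 hl hi => by omega⟩
    rw [List.range'_zero, List.foldl_nil, pvScan, if_neg (by omega)]
    simp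
  | succ cnt ih =>
    constructor
    · -- loop mode "not inside a run" (char_buffer[1] = false)
      intro k hk ms i l m c0
      rw [List.range'_succ, List.foldl_cons]
      by_cases hkn : k = b.length
      · have hc : cnt = 0 := by omega
        subst hkn hc
        have hstep : pvStepA a b phonemes ld entry_word offset (ms, i, l, m, c0, false) b.length
            = (ms, i, l, m, false, false) := by
          simp [pvStepA]
        rw [hstep, List.range'_zero, List.foldl_nil, pvScan, if_neg (by omega)]
        simp
      · have hklt : k < b.length := by omega
        by_cases hm : (b.getD k ' ' == a.getD (offset + k) ' ') = true
        · -- a run starts at k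
          have hm' : b[k]?.getD ' ' = a[offset + k]?.getD ' ' := by simpa using hm
          have hstep : pvStepA a b phonemes ld entry_word offset (ms, i, l, m, c0, false) k
              = (ms, (k : Int), ((1 : Nat) : Int), (b.drop k).take 1, false, true) := by
            have h1 : (b.drop k).take 1 = [b.getD k ' '] := by
              rw [show (1:Nat) = 0+1 from rfl, List.take_add_one]
              simp [List.getElem?_drop, List.getElem?_eq_getElem hklt]
            simp [pvStepA, hkn, hm', h1]
          rw [hstep, (ih).2 (k+1) (by omega) (by omega) ms k 1 false (by omega) (by omega)]
          have hr : pvRunLen a b offset k = pvRunLen a b offset (k+1) + 1 := by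
            rw [pvRunLen, if_pos hklt, if_pos hm]
          have hskip := pvScan_skip a b phonemes ld entry_word offset k
          rw [hr] at hskip
          conv_rhs => rw [pvScan, if_pos hklt, if_pos hm]
          dsimp only
          rw [show 1 + pvRunLen a b offset (k+1) = pvRunLen a b offset (k+1) + 1 from by omega,
              show k + 1 + pvRunLen a b offset (k+1) + 1 = k + (pvRunLen a b offset (k+1) + 1) + 1 from by omega,
              ← hskip]
          by_cases h2 : 2 ≤ pvRunLen a b offset (k+1) + 1
          · simp [h2, pvEmit]
          · simp [h2]
        · -- mismatch at k: nothing happens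
          have hm' : ¬ b[k]?.getD ' ' = a[offset + k]?.getD ' ' := by simpa using hm
          have hstep : pvStepA a b phonemes ld entry_word offset (ms, i, l, m, c0, false) k
              = (ms, i, l, m, false, false) := by
            simp [pvStepA, hkn, hm']
          rw [hstep, (ih).1 (k+1) (by omega) ms i l m false]
          conv_rhs => rw [pvScan, if_pos hklt, if_neg hm]
    · -- loop mode "inside a run" (char_buffer[1] = true), run started at i0, length l so far
      intro k hk hkle ms i0 l c0 hl hi
      rw [List.range'_succ, List.foldl_cons]
      by_cases hcont : k < b.length ∧ (b.getD k ' ' == a.getD (offset + k) ' ') = true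
      · -- the run continues at k
        obtain ⟨hklt, hm⟩ := hcont
        have hkn : k ≠ b.length := by omega
        have hm' : b[k]?.getD ' ' = a[offset + k]?.getD ' ' := by simpa using hm
        have h2 : (b.drop i0).take l ++ [b.getD k ' '] = (b.drop i0).take (l+1) := by
          rw [List.take_add_one]
          simp [List.getElem?_drop, List.getElem?_eq_getElem (show i0 + l < b.length from by omega),
            ← hi]
        have hstep : pvStepA a b phonemes ld entry_word offset
            (ms, (i0 : Int), (l : Int), (b.drop i0).take l, c0, true) k
            = (ms, (i0 : Int), (((l+1) : Nat) : Int), (b.drop i0).take (l+1), true, true) := by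
          simp [pvStepA, hkn, hm', ← h2]
        rw [hstep, (ih).2 (k+1) (by omega) (by omega) ms i0 (l+1) true (by omega) (by omega)]
        have hr : pvRunLen a b offset k = pvRunLen a b offset (k+1) + 1 := by
          rw [pvRunLen, if_pos hklt, if_pos hm]
        rw [hr, show l + (pvRunLen a b offset (k+1) + 1) = l + 1 + pvRunLen a b offset (k+1) from by omega,
            show k + (pvRunLen a b offset (k+1) + 1) + 1 = k + 1 + pvRunLen a b offset (k+1) + 1 from by omega]
      · -- the run ends at k (mismatch, or the sentinel pass at k = len(b)): flush
        have hc1 : (if k ≠ b.length then (b.getD k ' ' == a.getD (offset + k) ' ') else false) = false := by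
          by_cases hkn : k = b.length
          · simp [hkn]
          · rw [if_pos hkn]
            exact Bool.eq_false_iff.mpr (fun hmm => hcont ⟨by omega, hmm⟩)
        have hr : pvRunLen a b offset k = 0 := by
          by_cases hkn : k = b.length
          · rw [pvRunLen, if_neg (by omega)]
          · have hklt : k < b.length := by omega
            rw [if_pos hkn] at hc1
            rw [pvRunLen, if_pos hklt, if_neg (by simpa using hc1)]
        by_cases hl1 : l = 1
        · subst hl1
          have hstep : pvStepA a b phonemes ld entry_word offset
              (ms, (i0 : Int), ((1:Nat) : Int), (b.drop i0).take 1, c0, true) k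
              = (ms, (i0 : Int), ((1:Nat) : Int), (b.drop i0).take 1, true, false) := by
            simp only [pvStepA]
            rw [hc1]
            simp
          rw [hstep, (ih).1 (k+1) (by omega) ms _ _ _ true, hr]
          simp
        · have hstep : pvStepA a b phonemes ld entry_word offset
              (ms, (i0 : Int), (l : Int), (b.drop i0).take l, c0, true) k
              = (ms ++ [pvEmit b phonemes ld entry_word offset i0 l], (i0 : Int), (l : Int), (b.drop i0).take l, true, false) := by
            have hbeq : (((l : Nat) : Int) == 1) = false := by simp; omega
            simp only [pvStepA]
            rw [hc1]
            simp only [hbeq, Bool.and_false, Bool.and_true, Bool.not_false,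
              if_neg (by simp : ¬ false = true)]
            by_cases hld : ld < 0
            · rw [if_pos hld]; simp [pvEmit, hld]
            · rw [if_neg hld]; simp [pvEmit, hld]
          rw [hstep, (ih).1 (k+1) (by omega) _ _ _ _ true, hr]
          simp only [Nat.add_zero]
          rw [if_pos (by omega : 2 ≤ l)]


-- ===== VERDICT (by name: the statement is the Claim_ definition above) =====
theorem populate_legacy_spec : Claim_equal_populate_legacy := by
  intro input_word entry_word phonemes _
  unfold Spec_populate_legacy populate_legacy populate_legacy_alt
  dsimp only
  congr 1
  funext ms offset
  rw [List.range_eq_range']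
  exact (pvMain _ _ _ _ _ _ _).1 0 (by omega) ms (-1) 0 [] false
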